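-- pv_equiv track=rewrite | github.com/shinobu9/CS1 | 2nd sem/hash_table_w_chain.py | search
-- ===== SOURCE A (Python) =====
-- def search(table, key):
--     output = 0
--     basis = 91
--     module = 100
--     length = len(key)
--     line = key[::-1]
--     for i in range(length):
--         output += ( ord(line[i]) * ( basis ** i ) ) #% module
--     output = output % module
--     branch_num = output % len(table)
--     for chunk in table[branch_num]:
--         if key == chunk[1]:
--             return chunk[2]
--     return('KeyError')
-- ===== SOURCE B (Python) =====
-- def search(table, key):
--     h = 0
--     for c in key:
--         h = (h * 91 + ord(c)) % 100
--     bucket = table[h % len(table)]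
--     return next((v for _, k, v in bucket if k == key), 'KeyError')
-- ===== Notes on version B (the rewrite author's own statement) =====
-- stated objective: faster
-- what changed: Replaces the reversed-string sum of ord(c)*91**i with growing bigint powers by an incremental Horner accumulation kept reduced mod 100 at every step, and the explicit bucket loop by a generator/next lookup.
import Mathlib
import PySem

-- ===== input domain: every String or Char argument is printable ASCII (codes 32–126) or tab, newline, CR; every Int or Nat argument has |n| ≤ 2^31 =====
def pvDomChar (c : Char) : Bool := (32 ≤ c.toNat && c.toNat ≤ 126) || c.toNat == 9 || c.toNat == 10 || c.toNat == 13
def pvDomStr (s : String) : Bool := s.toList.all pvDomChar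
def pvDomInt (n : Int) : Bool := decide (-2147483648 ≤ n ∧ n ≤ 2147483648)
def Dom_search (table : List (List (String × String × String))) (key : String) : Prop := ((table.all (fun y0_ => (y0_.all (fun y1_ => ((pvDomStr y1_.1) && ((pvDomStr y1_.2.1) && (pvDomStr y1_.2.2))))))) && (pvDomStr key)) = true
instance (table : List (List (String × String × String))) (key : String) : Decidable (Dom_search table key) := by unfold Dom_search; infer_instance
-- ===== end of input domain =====

-- B replaces A's bigint power sum over the reversed key by a Horner pass reduced mod 100 each step (objective: faster, asymptotic in key length).

-- ===== PORT A =====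
-- the 'for chunk in table[branch_num]' loop with early return
def searchChunks (key : String) : List (String × String × String) → String
  | [] => "KeyError"
  | chunk :: rest => if key == chunk.2.1 then chunk.2.2 else searchChunks key rest

def search (table : List (List (String × String × String))) (key : String) : String :=
  let length : Int := PySem.Str.len key
  let line : List Char := (PySem.List.slice? key.toList none none (-1)).getD []   -- key[::-1]
  let output : Int :=
    (PySem.List.pyRange 0 length 1).foldl
      (fun out i => out + ((PySem.List.pyGetD line i 'a').toNat : Int) * 91 ^ i.toNat) 0
  let output : Int := PySem.Int.mod output 100
  let branch_num : Int := PySem.Int.mod output (table.length : Int)   -- raises in Python iff table = []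
  searchChunks key (PySem.List.pyGetD table branch_num [])

-- ===== PORT B =====
def hornerHash (cs : List Char) : Int :=
  cs.foldl (fun h c => PySem.Int.mod (h * 91 + (c.toNat : Int)) 100) 0

def search_alt (table : List (List (String × String × String))) (key : String) : String :=
  let h : Int := hornerHash key.toList
  let bucket := PySem.List.pyGetD table (PySem.Int.mod h (table.length : Int)) []
  ((bucket.find? (fun chunk => chunk.2.1 == key)).map (·.2.2)).getD "KeyError"

-- ===== PRECONDITION & SPEC =====
-- Pre_ excludes only table = [], on which Python A raises ZeroDivisionError (len(table) = 0).
def Pre_search (table : List (List (String × String × String))) (key : String) : Prop := table ≠ []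
instance (table : List (List (String × String × String))) (key : String) : Decidable (Pre_search table key) := by unfold Pre_search; infer_instance
def pvWitness_search : (List (List (String × String × String))) × String := ([[("a", "k", "v")]], "k")
def Spec_search (table : List (List (String × String × String))) (key : String) (out : String) : Prop := out = search_alt table key
instance (table : List (List (String × String × String))) (key : String) (out : String) : Decidable (Spec_search table key out) := by unfold Spec_search; infer_instance

-- ===== CLAIM (what is proved, stated in full; the proofs are below) =====
def Claim_equal_search : Prop := ∀ (table : List (List (String × String × String))) (key : String), Dom_search table key → Pre_search table key → Spec_search table key (search table key)

-- ===== LEMMAS AND PROOFS =====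

-- A's power sum, as a sum of a mapped range
def powSum (l : List Char) : Int :=
  ((List.range l.length).map (fun k => ((l.getD k 'a').toNat : Int) * 91 ^ k)).sum

theorem foldl_add_toSum (l : List Int) (g : Int → Int) (init : Int) :
    l.foldl (fun out x => out + g x) init = init + (l.map g).sum := by
  induction l generalizing init with
  | nil => simp
  | cons x t ih => simp [List.foldl_cons, ih, add_assoc]

theorem aLoop_eq_powSum (line : List Char) :
    (PySem.List.pyRange 0 (line.length : Int) 1).foldl
      (fun out i => out + ((PySem.List.pyGetD line i 'a').toNat : Int) * 91 ^ i.toNat) 0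
      = powSum line := by
  rw [foldl_add_toSum, PySem.List.pyRange_one]
  simp only [powSum, zero_add, sub_zero, Int.toNat_natCast, List.map_map]
  congr 1
  apply List.map_congr_left
  intro k hk
  simp [Function.comp, PySem.List.pyGetD_natCast]

theorem powSum_cons (c : Char) (l : List Char) :
    powSum (c :: l) = (c.toNat : Int) + 91 * powSum l := by
  simp only [powSum, List.length_cons, List.range_succ_eq_map, List.map_cons, List.map_map,
    List.sum_cons]
  rw [show List.map ((fun k => (((c :: l).getD k 'a').toNat : Int) * 91 ^ k) ∘ Nat.succ)
        (List.range l.length)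
      = List.map (fun k => 91 * ((((l.getD k 'a').toNat : Int)) * 91 ^ k)) (List.range l.length)
    from List.map_congr_left fun k hk => by simp [Function.comp, pow_succ]; ring]
  rw [List.sum_map_mul_left]
  simp

theorem emod_horner (S c : Int) : (S % 100 * 91 + c) % 100 = ((c : Int) + 91 * S) % 100 := by
  have h : (c : Int) + 91 * S = (S % 100 * 91 + c) + 100 * (91 * (S / 100)) := by
    have := Int.emod_add_mul_ediv S 100
    ring_nf
    omega
  rw [h, Int.add_mul_emod_self_left]

theorem horner_eq_powSum_rev (ks : List Char) :
    hornerHash ks = PySem.Int.mod (powSum ks.reverse) 100 := by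
  induction ks using List.reverseRecOn with
  | nil => simp [hornerHash, powSum, PySem.Int.mod]
  | append_singleton t c ih =>
      rw [hornerHash, List.foldl_append]
      simp only [List.foldl_cons, List.foldl_nil]
      rw [← hornerHash, ih, List.reverse_append]
      simp only [List.reverse_singleton, List.singleton_append, powSum_cons]
      simp only [PySem.Int.mod_eq_emod_of_pos (show (0:Int) < 100 by norm_num)]
      exact emod_horner _ _

theorem scan_eq_find (key : String) (bucket : List (String × String × String)) :
    searchChunks key bucket
      = ((bucket.find? (fun chunk => chunk.2.1 == key)).map (·.2.2)).getD "KeyError" := by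
  induction bucket with
  | nil => simp [searchChunks]
  | cons chunk rest ih =>
      by_cases h : key = chunk.2.1
      · simp [searchChunks, List.find?, h]
      · have h' : (chunk.2.1 == key) = false := by
          simp; exact fun e => h e.symm
        simp [searchChunks, List.find?, h, h', ih]

-- ===== VERDICT (by name: the statement is the Claim_ definition above) =====
theorem search_spec : Claim_equal_search := by
  intro table key _ _
  unfold Spec_search search search_alt
  simp only []
  rw [show (PySem.List.slice? key.toList none none (-1)).getD []
        = key.toList.reverse from by rw [PySem.List.slice?_none_none_neg_one]; rfl]
  rw [show (PySem.Str.len key) = ((key.toList.reverse).length : Int) from by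
        simp [PySem.Str.len_eq]]
  rw [aLoop_eq_powSum, ← List.reverse_reverse key.toList, horner_eq_powSum_rev,
      List.reverse_reverse, scan_eq_find]
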